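-- pv_equiv track=rewrite | github.com/SaxonRah/pygame-markup-gui | pygame_markup_gui/enhanced_css_engine.py | _create_grid_area_map
-- ===== SOURCE A (Python) =====
-- from typing import Dict, List, Tuple, Optional, Union, Any
--
-- def _create_grid_area_map(grid_areas: List[List[str]]) -> Dict[str, Tuple[int, int, int, int]]:
--     """Create mapping from area names to grid bounds (row_start, col_start, row_end, col_end)"""
--     area_map = {}
--
--     for row_idx, row in enumerate(grid_areas):
--         for col_idx, area_name in enumerate(row):
--             if area_name != '.' and area_name != 'none':
--                 if area_name not in area_map:
--                     # Initialize with current position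
--                     area_map[area_name] = [row_idx, col_idx, row_idx + 1, col_idx + 1]
--                 else:
--                     # Extend the area bounds
--                     bounds = area_map[area_name]
--                     bounds[0] = min(bounds[0], row_idx)  # min row
--                     bounds[1] = min(bounds[1], col_idx)  # min col
--                     bounds[2] = max(bounds[2], row_idx + 1)  # max row
--                     bounds[3] = max(bounds[3], col_idx + 1)  # max col
--
--     # Convert to tuples
--     return {name: tuple(bounds) for name, bounds in area_map.items()}
-- ===== SOURCE B (Python) =====
-- def _create_grid_area_map(grid_areas):
--     # Group pass: index each named area's cell coordinates in first-encounter order.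
--     index = {}
--     for row_idx, row in enumerate(grid_areas):
--         for col_idx, area_name in enumerate(row):
--             if area_name != '.' and area_name != 'none':
--                 index.setdefault(area_name, []).append((row_idx, col_idx))
--     # Reduce pass: bounds of each coordinate list.
--     result = {}
--     for name, cells in index.items():
--         rows = [r for r, _ in cells]
--         cols = [c for _, c in cells]
--         result[name] = (min(rows), min(cols), max(rows) + 1, max(cols) + 1)
--     return result
-- ===== Notes on version B (the rewrite author's own statement) =====
-- stated objective: alternative
-- what changed: Replaces the single-pass running-extrema dict update with a two-phase decomposition: one grouping pass building an index from area name to its list of cell coordinates, then a reduction pass computing each name's bounds as (min rows, min cols, max rows + 1, max cols + 1).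
import Mathlib
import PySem

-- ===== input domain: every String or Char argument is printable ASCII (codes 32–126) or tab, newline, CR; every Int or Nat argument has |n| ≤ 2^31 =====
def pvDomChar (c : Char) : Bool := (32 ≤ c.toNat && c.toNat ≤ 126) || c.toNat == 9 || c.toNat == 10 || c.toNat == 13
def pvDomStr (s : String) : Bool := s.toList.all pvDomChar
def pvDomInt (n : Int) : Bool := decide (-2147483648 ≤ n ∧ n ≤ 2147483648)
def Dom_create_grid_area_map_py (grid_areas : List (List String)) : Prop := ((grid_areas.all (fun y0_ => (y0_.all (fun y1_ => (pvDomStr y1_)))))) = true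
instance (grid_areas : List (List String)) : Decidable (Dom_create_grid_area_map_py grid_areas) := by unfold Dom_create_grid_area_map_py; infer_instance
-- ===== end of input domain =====

-- B replaces A's running-extrema dict update with a two-phase decomposition (group coordinates per
-- name, then reduce each list to bounds); objective: alternative, same cost.

-- ===== PORT A =====
-- one cell of A's nested loop: running min/max update of the bounds entry
def pvStepA (ri : Int) (d : PySem.Dict String (Int × Int × Int × Int)) (p : Int × String) :
    PySem.Dict String (Int × Int × Int × Int) :=
  if p.2 ≠ "." ∧ p.2 ≠ "none" then
    match d.get? p.2 with
    | none => d.insert p.2 (ri, p.1, ri + 1, p.1 + 1)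
    | some b => d.insert p.2 (min b.1 ri, min b.2.1 p.1, max b.2.2.1 (ri + 1), max b.2.2.2 (p.1 + 1))
  else d

def create_grid_area_map_py (grid_areas : List (List String)) : List (String × Int × Int × Int × Int) :=
  ((PySem.List.enumerate grid_areas).foldl
      (fun d q => (PySem.List.enumerate q.2).foldl (pvStepA q.1) d)
      PySem.Dict.empty).items

-- ===== PORT B =====
-- one cell of B's grouping loop: index.setdefault(name, []).append((row_idx, col_idx))
def pvStepB (ri : Int) (d : PySem.Dict String (List (Int × Int))) (p : Int × String) :
    PySem.Dict String (List (Int × Int)) :=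
  if p.2 ≠ "." ∧ p.2 ≠ "none" then d.modify p.2 [] (fun l => l ++ [(ri, p.1)]) else d

-- (min rows, min cols, max rows + 1, max cols + 1); the .getD 0 is unreachable: every indexed list is nonempty
def pvBounds (cells : List (Int × Int)) : Int × Int × Int × Int :=
  ((PySem.List.min? (cells.map (·.1)) (fun x => x)).getD 0,
   (PySem.List.min? (cells.map (·.2)) (fun x => x)).getD 0,
   (PySem.List.max? (cells.map (·.1)) (fun x => x)).getD 0 + 1,
   (PySem.List.max? (cells.map (·.2)) (fun x => x)).getD 0 + 1)

def create_grid_area_map_py_alt (grid_areas : List (List String)) : List (String × Int × Int × Int × Int) :=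
  let index := (PySem.List.enumerate grid_areas).foldl
      (fun d q => (PySem.List.enumerate q.2).foldl (pvStepB q.1) d)
      PySem.Dict.empty
  (index.items.foldl (fun res p => res.insert p.1 (pvBounds p.2)) PySem.Dict.empty).items

-- ===== PRECONDITION & SPEC =====
def Spec_create_grid_area_map_py (grid_areas : List (List String)) (out : List (String × Int × Int × Int × Int)) : Prop := out = create_grid_area_map_py_alt grid_areas
instance (grid_areas : List (List String)) (out : List (String × Int × Int × Int × Int)) : Decidable (Spec_create_grid_area_map_py grid_areas out) := by unfold Spec_create_grid_area_map_py; infer_instance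

-- ===== CLAIM (what is proved, stated in full; the proofs are below) =====
def Claim_equal_create_grid_area_map_py : Prop := ∀ (grid_areas : List (List String)), Dom_create_grid_area_map_py grid_areas → Spec_create_grid_area_map_py grid_areas (create_grid_area_map_py grid_areas)

-- ===== LEMMAS AND PROOFS =====

def pvG (p : String × List (Int × Int)) : String × Int × Int × Int × Int := (p.1, pvBounds p.2)

-- simulation invariant between A's bounds dict and B's index dict
def pvInv (dA : PySem.Dict String (Int × Int × Int × Int)) (dB : PySem.Dict String (List (Int × Int))) : Prop :=
  dA.items = dB.items.map pvG ∧ (∀ p ∈ dB.items, p.2 ≠ []) ∧ dB.keys.Nodup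

lemma pv_min?_char (xs : List Int) (m : Int) (hm : m ∈ xs) (h : ∀ y ∈ xs, m ≤ y) :
    PySem.List.min? xs (fun x => x) = some m := by
  cases heq : PySem.List.min? xs (fun x => x) with
  | none => rw [PySem.List.min?_eq_none_iff] at heq; simp [heq] at hm
  | some m' =>
    have h1 := PySem.List.min?_mem heq
    have h2 := PySem.List.min?_isMin heq m hm
    have h3 := h m' h1
    simp at h2 ⊢
    omega

lemma pv_max?_char (xs : List Int) (m : Int) (hm : m ∈ xs) (h : ∀ y ∈ xs, y ≤ m) :
    PySem.List.max? xs (fun x => x) = some m := by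
  cases heq : PySem.List.max? xs (fun x => x) with
  | none => rw [PySem.List.max?_eq_none_iff] at heq; simp [heq] at hm
  | some m' =>
    have h1 := PySem.List.max?_mem heq
    have h2 := PySem.List.max?_isMax heq m hm
    have h3 := h m' h1
    simp at h2 ⊢
    omega

lemma pv_min?_append_single (xs : List Int) (a : Int) (h : xs ≠ []) :
    PySem.List.min? (xs ++ [a]) (fun x => x)
      = some (min ((PySem.List.min? xs (fun x => x)).getD 0) a) := by
  cases heq : PySem.List.min? xs (fun x => x) with
  | none => rw [PySem.List.min?_eq_none_iff] at heq; exact absurd heq h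
  | some m =>
    have hmem := PySem.List.min?_mem heq
    have hmin := PySem.List.min?_isMin heq
    apply pv_min?_char
    · rcases min_choice m a with hm | hm
      · rw [Option.getD_some, hm]; exact List.mem_append.mpr (Or.inl hmem)
      · rw [Option.getD_some, hm]; simp
    · intro y hy
      rcases List.mem_append.mp hy with hy | hy
      · exact le_trans (min_le_left _ _) (hmin y hy)
      · simp at hy; simp [hy]

lemma pv_max?_append_single (xs : List Int) (a : Int) (h : xs ≠ []) :
    PySem.List.max? (xs ++ [a]) (fun x => x)
      = some (max ((PySem.List.max? xs (fun x => x)).getD 0) a) := by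
  cases heq : PySem.List.max? xs (fun x => x) with
  | none => rw [PySem.List.max?_eq_none_iff] at heq; exact absurd heq h
  | some m =>
    have hmem := PySem.List.max?_mem heq
    have hmax := PySem.List.max?_isMax heq
    apply pv_max?_char
    · rcases max_choice m a with hm | hm
      · rw [Option.getD_some, hm]; exact List.mem_append.mpr (Or.inl hmem)
      · rw [Option.getD_some, hm]; simp
    · intro y hy
      rcases List.mem_append.mp hy with hy | hy
      · exact le_trans (hmax y hy) (le_max_left _ _)
      · simp at hy; simp [hy]

lemma pvBounds_single (r c : Int) : pvBounds [(r, c)] = (r, c, r + 1, c + 1) := by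
  simp [pvBounds, pv_min?_char [r] r (by simp) (by simp), pv_min?_char [c] c (by simp) (by simp),
        pv_max?_char [r] r (by simp) (by simp), pv_max?_char [c] c (by simp) (by simp)]

lemma pvBounds_append (cells : List (Int × Int)) (r c : Int) (h : cells ≠ []) :
    pvBounds (cells ++ [(r, c)]) =
      (min (pvBounds cells).1 r, min (pvBounds cells).2.1 c,
       max (pvBounds cells).2.2.1 (r + 1), max (pvBounds cells).2.2.2 (c + 1)) := by
  have hne1 : cells.map (·.1) ≠ [] := by simp [h]
  have hne2 : cells.map (·.2) ≠ [] := by simp [h]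
  simp only [pvBounds, List.map_append, List.map_cons, List.map_nil,
    pv_min?_append_single _ _ hne1, pv_min?_append_single _ _ hne2,
    pv_max?_append_single _ _ hne1, pv_max?_append_single _ _ hne2, Option.getD_some,
    Prod.mk.injEq]
  refine ⟨trivial, trivial, ?_, ?_⟩ <;> omega

lemma pv_modify_eq_insert (d : PySem.Dict String (List (Int × Int))) (k : String)
    (f : List (Int × Int) → List (Int × Int)) :
    d.modify k [] f = d.insert k (f (d.getD k [])) := rfl

lemma pv_keys_eq (dA : PySem.Dict String (Int × Int × Int × Int))
    (dB : PySem.Dict String (List (Int × Int))) (h : dA.items = dB.items.map pvG) :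
    dA.keys = dB.keys := by
  simp only [PySem.Dict.keys, h, List.map_map]
  rfl

lemma pv_step_inv (ri ci : Int) (s : String) (dA : PySem.Dict String (Int × Int × Int × Int))
    (dB : PySem.Dict String (List (Int × Int))) (h : pvInv dA dB) :
    pvInv (pvStepA ri dA (ci, s)) (pvStepB ri dB (ci, s)) := by
  obtain ⟨hitems, hne, hnd⟩ := h
  have hkeys := pv_keys_eq dA dB hitems
  by_cases hcond : s ≠ "." ∧ s ≠ "none"
  · by_cases hc : dB.contains s = true
    · -- existing key
      obtain ⟨cells, hget⟩ : ∃ cells, dB.get? s = some cells := by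
        cases hg : dB.get? s with
        | none => rw [PySem.Dict.get?_eq_none_iff_contains] at hg; simp [hg] at hc
        | some v => exact ⟨v, rfl⟩
      have hmemB : (s, cells) ∈ dB.items := PySem.Dict.mem_items_of_get?_eq_some dB hget
      have hcellsne : cells ≠ [] := hne _ hmemB
      have hmemA : (s, pvBounds cells) ∈ dA.items := by
        rw [hitems]; exact List.mem_map.mpr ⟨(s, cells), hmemB, rfl⟩
      have hndA : dA.keys.Nodup := by rw [hkeys]; exact hnd
      have hgetA : dA.get? s = some (pvBounds cells) :=
        PySem.Dict.get?_of_mem_items dA hmemA hndA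
      have hcA : dA.contains s = true := by
        rw [PySem.Dict.contains_eq_isSome_get?, hgetA]; rfl
      unfold pvInv pvStepA pvStepB
      rw [if_pos hcond, if_pos hcond]
      simp only [hgetA, pv_modify_eq_insert, PySem.Dict.getD_of_get?_eq_some dB [] hget]
      refine ⟨?_, ?_, ?_⟩
      · rw [PySem.Dict.items_insert_of_contains dA _ hcA,
            PySem.Dict.items_insert_of_contains dB _ hc, hitems, List.map_map, List.map_map]
        apply List.map_congr_left
        intro q hq
        by_cases hqs : q.1 = s
        · have : dB.get? s = some q.2 := by
            have := PySem.Dict.get?_of_mem_items dB (k := q.1) (v := q.2) (by exact hq) hnd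
            rwa [hqs] at this
          have hq2 : q.2 = cells := by rw [hget] at this; exact (Option.some.injEq _ _).mp this.symm
          simp [Function.comp, pvG, hqs, hq2, pvBounds_append cells ri ci hcellsne]
        · simp [Function.comp, pvG, hqs]
      · intro p hp
        rcases (PySem.Dict.mem_items_insert _ _ _ _).mp hp with hp | ⟨hp, _⟩
        · subst hp; simp
        · exact hne _ hp
      · exact PySem.Dict.nodup_keys_insert _ _ _ hnd
    · -- fresh key
      have hcB : dB.contains s = false := by simpa using hc
      have hcA : dA.contains s = false := by
        rw [PySem.Dict.contains_eq_decide_mem_keys, hkeys, ← PySem.Dict.contains_eq_decide_mem_keys]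
        exact hcB
      have hgetA : dA.get? s = none := by
        rw [PySem.Dict.get?_eq_none_iff_contains]; exact hcA
      unfold pvInv pvStepA pvStepB
      rw [if_pos hcond, if_pos hcond]
      simp only [hgetA, pv_modify_eq_insert, PySem.Dict.getD_of_not_contains dB [] hcB]
      refine ⟨?_, ?_, ?_⟩
      · rw [PySem.Dict.items_insert_of_not_contains dA _ hcA,
            PySem.Dict.items_insert_of_not_contains dB _ hcB, hitems, List.map_append]
        simp [pvG, pvBounds_single]
      · intro p hp
        rcases (PySem.Dict.mem_items_insert _ _ _ _).mp hp with hp | ⟨hp, _⟩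
        · subst hp; simp
        · exact hne _ hp
      · exact PySem.Dict.nodup_keys_insert _ _ _ hnd
  · unfold pvInv pvStepA pvStepB
    rw [if_neg hcond, if_neg hcond]
    exact ⟨hitems, hne, hnd⟩

lemma pv_foldl_inv {α : Type} (l : List α)
    (fA : PySem.Dict String (Int × Int × Int × Int) → α → PySem.Dict String (Int × Int × Int × Int))
    (fB : PySem.Dict String (List (Int × Int)) → α → PySem.Dict String (List (Int × Int)))
    (hstep : ∀ dA dB a, pvInv dA dB → pvInv (fA dA a) (fB dB a)) :
    ∀ dA dB, pvInv dA dB → pvInv (l.foldl fA dA) (l.foldl fB dB) := by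
  induction l with
  | nil => intro dA dB h; exact h
  | cons x xs ih => intro dA dB h; exact ih _ _ (hstep dA dB x h)

lemma pvInv_empty : pvInv PySem.Dict.empty PySem.Dict.empty := by
  refine ⟨rfl, ?_, ?_⟩ <;> simp [PySem.Dict.empty, PySem.Dict.keys]

-- ===== VERDICT (by name: the statement is the Claim_ definition above) =====
theorem create_grid_area_map_py_spec : Claim_equal_create_grid_area_map_py := by
  intro grid_areas _
  unfold Spec_create_grid_area_map_py create_grid_area_map_py create_grid_area_map_py_alt
  have hinv : pvInv
      ((PySem.List.enumerate grid_areas).foldl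
        (fun d q => (PySem.List.enumerate q.2).foldl (pvStepA q.1) d) PySem.Dict.empty)
      ((PySem.List.enumerate grid_areas).foldl
        (fun d q => (PySem.List.enumerate q.2).foldl (pvStepB q.1) d) PySem.Dict.empty) := by
    apply pv_foldl_inv
    · intro dA dB q hq
      apply pv_foldl_inv
      · intro dA' dB' p hp
        exact pv_step_inv q.1 p.1 p.2 dA' dB' hp
      · exact hq
    · exact pvInv_empty
  obtain ⟨hitems, hne, hnd⟩ := hinv
  set dB := (PySem.List.enumerate grid_areas).foldl
      (fun d q => (PySem.List.enumerate q.2).foldl (pvStepB q.1) d) PySem.Dict.empty with hdB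
  rw [hitems]
  have hfresh : ∀ p ∈ dB.items, (PySem.Dict.empty : PySem.Dict String (Int × Int × Int × Int)).contains p.1 = false := by
    intro p _; simp [PySem.Dict.contains_empty]
  have hndk : (dB.items.map (·.1)).Nodup := hnd
  rw [PySem.Dict.items_foldl_insert_fresh dB.items (fun p => p.1) (fun p => pvBounds p.2)
      PySem.Dict.empty hfresh hndk]
  simp [pvG, PySem.Dict.empty]
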